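-- pv_equiv track=rewrite | github.com/martynaskowronska/BankingApp-ODAS | website/views.py | generate_substrings
-- ===== SOURCE A (Python) =====
-- from itertools import combinations
--
-- def generate_substrings(password):
--     substrings = []
--     length = len(password) - (round(len(password)/2) - 1)
--     index_combinations = combinations(range(len(password)), length)
--
--     for indices in index_combinations:
--         substring = ''.join(password[i] for i in sorted(indices))
--         substrings.append(substring)
--
--     return substrings
-- ===== SOURCE B (Python) =====
-- def generate_substrings(password):
--     length = len(password) - (round(len(password) / 2) - 1)
--
--     def go(chars, k):
--         # all length-k subsequences of chars, in lexicographic (include-first) order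
--         if k == 0:
--             return ['']
--         if len(chars) < k:
--             return []
--         first, rest = chars[0], chars[1:]
--         return [first + s for s in go(rest, k - 1)] + go(rest, k)
--
--     return go(password, length)
-- ===== Notes on version B (the rewrite author's own statement) =====
-- stated objective: simpler
-- what changed: Replaces itertools.combinations over index tuples plus per-tuple sorted-join with a direct choose/skip recursion over the characters that emits each substring as it is built, eliminating index tuples, sorting and joining.
import Mathlib
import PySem

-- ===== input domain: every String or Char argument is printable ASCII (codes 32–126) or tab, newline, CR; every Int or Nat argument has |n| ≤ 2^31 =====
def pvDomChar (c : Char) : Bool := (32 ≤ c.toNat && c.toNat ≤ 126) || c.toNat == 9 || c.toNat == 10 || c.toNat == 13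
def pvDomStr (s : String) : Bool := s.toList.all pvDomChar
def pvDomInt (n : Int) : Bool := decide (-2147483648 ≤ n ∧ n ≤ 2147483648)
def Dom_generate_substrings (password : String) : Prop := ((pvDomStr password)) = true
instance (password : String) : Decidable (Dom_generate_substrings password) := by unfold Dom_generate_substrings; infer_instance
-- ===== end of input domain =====

-- B replaces itertools.combinations over index tuples (plus a per-tuple sorted-join) with a
-- direct choose/skip recursion over the characters that emits each substring as it is built
-- (objective: simpler; same asymptotic cost).

-- ===== PORT A =====

-- round(n/2) with Python's banker's rounding (n/2 is exact or a .5 value, so this is exact)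
def pvRoundHalf (n : Nat) : Nat :=
  if n % 2 == 0 then n / 2
  else if (n / 2) % 2 == 0 then n / 2 else n / 2 + 1

-- itertools.combinations(range-list, k): all strictly increasing k-element picks,
-- in itertools' lexicographic order
def pvCombs : Nat → List Nat → List (List Nat)
  | 0, _ => [[]]
  | _ + 1, [] => []
  | k + 1, x :: rest => (pvCombs k rest).map (fun l => x :: l) ++ pvCombs (k + 1) rest

def generate_substrings (password : String) : List String :=
  let cs := password.toList
  -- length = len(password) - (round(len(password)/2) - 1), rewritten n + 1 - round(n/2);
  -- equal in ℕ since round(n/2) ≤ n + 1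
  let length := cs.length + 1 - pvRoundHalf cs.length
  (pvCombs length (List.range cs.length)).map (fun indices =>
    String.ofList ((PySem.List.sorted indices (fun i => i)).map (fun i => cs.getD i ' ')))

-- ===== PORT B =====

-- go(chars, k): all length-k subsequences, include-first then skip
def pvGo (k : Nat) (cs : List Char) : List String :=
  match k with
  | 0 => [""]
  | k' + 1 =>
    if cs.length < k' + 1 then []
    else
      match cs with
      | [] => []  -- unreachable: cs.length ≥ k' + 1 ≥ 1
      | c :: rest => (pvGo k' rest).map (fun s => String.ofList (c :: s.toList)) ++ pvGo (k' + 1) rest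
termination_by cs.length
decreasing_by all_goals simp

def generate_substrings_alt (password : String) : List String :=
  let cs := password.toList
  pvGo (cs.length + 1 - pvRoundHalf cs.length) cs

-- ===== PRECONDITION & SPEC =====
def Spec_generate_substrings (password : String) (out : List String) : Prop := out = generate_substrings_alt password
instance (password : String) (out : List String) : Decidable (Spec_generate_substrings password out) := by unfold Spec_generate_substrings; infer_instance

-- ===== CLAIM (what is proved, stated in full; the proofs are below) =====
def Claim_equal_generate_substrings : Prop := ∀ (password : String), Dom_generate_substrings password → Spec_generate_substrings password (generate_substrings password)

-- ===== LEMMAS AND PROOFS =====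

-- combinations directly over the characters (proof-side bridge between the two ports)
def pvCombsC : Nat → List Char → List (List Char)
  | 0, _ => [[]]
  | _ + 1, [] => []
  | k + 1, x :: rest => (pvCombsC k rest).map (fun l => x :: l) ++ pvCombsC (k + 1) rest

theorem pvCombs_map (g : Nat → Char) :
    ∀ (xs : List Nat) (k : Nat),
      (pvCombs k xs).map (List.map g) = pvCombsC k (xs.map g) := by
  intro xs
  induction xs with
  | nil => intro k; cases k <;> simp [pvCombs, pvCombsC]
  | cons x rest ih =>
    intro k
    cases k with
    | zero => simp [pvCombs, pvCombsC]
    | succ k' =>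
      simp only [pvCombs, List.map_cons, pvCombsC, List.map_append, List.map_map, ← ih]
      simp [Function.comp_def]

theorem pvCombs_sublist :
    ∀ (xs : List Nat) (k : Nat) (l : List Nat), l ∈ pvCombs k xs → l.Sublist xs := by
  intro xs
  induction xs with
  | nil =>
    intro k l hl
    cases k <;> simp_all [pvCombs]
  | cons x rest ih =>
    intro k l hl
    cases k with
    | zero => simp_all [pvCombs]
    | succ k' =>
      simp only [pvCombs, List.mem_append, List.mem_map] at hl
      rcases hl with ⟨l', hl', rfl⟩ | hl
      · exact (ih _ _ hl').cons₂ x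
      · exact (ih _ _ hl).cons x

theorem pvCombsC_nil_of_lt :
    ∀ (cs : List Char) (k : Nat), cs.length < k → pvCombsC k cs = [] := by
  intro cs
  induction cs with
  | nil =>
    intro k hk
    cases k with
    | zero => omega
    | succ k' => rfl
  | cons c rest ih =>
    intro k hk
    cases k with
    | zero => omega
    | succ k' =>
      simp only [List.length_cons] at hk
      cases k' with
      | zero => omega
      | succ k'' =>
        simp only [pvCombsC, List.append_eq_nil_iff, List.map_eq_nil_iff]
        exact ⟨ih (k'' + 1) (by omega), ih (k'' + 2) (by omega)⟩

theorem pvGo_eq :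
    ∀ (cs : List Char) (k : Nat), pvGo k cs = (pvCombsC k cs).map (fun l => String.ofList l) := by
  intro cs
  induction cs with
  | nil =>
    intro k
    cases k with
    | zero => simp [pvGo, pvCombsC]
    | succ k' => simp [pvGo, pvCombsC]
  | cons c rest ih =>
    intro k
    cases k with
    | zero => simp [pvGo, pvCombsC]
    | succ k' =>
      rw [pvGo]
      split
      · next h =>
        rw [pvCombsC_nil_of_lt _ _ (by simpa using h)]
        rfl
      · next h =>
        simp only [pvCombsC, List.map_append, List.map_map, ih]
        congr 1
        apply List.map_congr_left
        intro a _
        simp [String.toList_ofList]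

theorem range_map_getD (cs : List Char) :
    (List.range cs.length).map (fun i => cs.getD i ' ') = cs := by
  apply List.ext_getElem
  · simp
  · intro i h1 h2
    simp [List.getD_eq_getElem?_getD, List.getElem?_eq_getElem h2]

-- ===== VERDICT (by name: the statement is the Claim_ definition above) =====
theorem generate_substrings_spec : Claim_equal_generate_substrings := by
  intro password _
  unfold Spec_generate_substrings generate_substrings generate_substrings_alt
  set cs := password.toList with hcs
  set k := cs.length + 1 - pvRoundHalf cs.length with hk
  have hsorted : ∀ l ∈ pvCombs k (List.range cs.length),
      PySem.List.sorted l (fun i => i) = l := by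
    intro l hl
    exact PySem.List.sorted_eq_self_of_pairwise l _
      (List.Pairwise.sublist (pvCombs_sublist _ _ _ hl) List.pairwise_le_range)
  calc (pvCombs k (List.range cs.length)).map (fun indices =>
          String.ofList ((PySem.List.sorted indices (fun i => i)).map (fun i => cs.getD i ' ')))
      = (pvCombs k (List.range cs.length)).map (fun indices =>
          String.ofList (indices.map (fun i => cs.getD i ' '))) := by
        apply List.map_congr_left
        intro l hl
        rw [hsorted l hl]
    _ = ((pvCombs k (List.range cs.length)).map (List.map (fun i => cs.getD i ' '))).map
          (fun l => String.ofList l) := by rw [List.map_map]; rfl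
    _ = (pvCombsC k ((List.range cs.length).map (fun i => cs.getD i ' '))).map
          (fun l => String.ofList l) := by rw [pvCombs_map]
    _ = pvGo k cs := by rw [range_map_getD, pvGo_eq]
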